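-- pv_equiv track=rewrite | github.com/Cho-SangHyun/Algorithm-Study | 프로그래머스/신고결과받기.py | solution
-- ===== SOURCE A (Python) =====
-- from collections import defaultdict
--
-- def solution(id_list, report, k):
--     answer, id_number = [], {}
--
--     for i, id in enumerate(id_list):
--         id_number[id] = i
--         answer.append(0)
--
--     report_graph = defaultdict(set)
--
--     for rp in report:
--         userID, reportID = rp.split()
--         report_graph[reportID].add(userID)
--
--     for id in id_list:
--         if len(report_graph[id]) >= k:
--             for r_id in report_graph[id]:
--                 answer[id_number[r_id]] += 1
--
--     return answer
-- ===== SOURCE B (Python) =====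
-- def solution(id_list, report, k):
--     # brute-force counting comprehensions: no dicts, no index map, no mutable answer array
--     pairs = {tuple(rp.split()) for rp in report}
--     flagged = {r for r in id_list if sum(r2 == r for _, r2 in pairs) >= k}
--     return [sum(1 for u, r in pairs if u == me and r in flagged) for me in id_list]
-- ===== Notes on version B (the rewrite author's own statement) =====
-- stated objective: simpler
-- what changed: A stages an index map, a mutable answer array and a reportee-keyed dict of reporter-sets, then pushes in-place increments through the index map; B uses no dicts and no mutation at all: it dedupes the reports into a pair set and computes everything by three pure comprehensions (the flagged-id set by a per-id brute-force scan of the pairs, then each answer slot directly as a count of that reporter's pairs whose reportee is flagged), trading A's linear hash-based passes for direct quadratic counting.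
-- outside the precondition, e.g. on solution(['a', 'a'], ['a a'], 1): A returns [0, 2], B returns [1, 1]; on solution(['a'], ['b a'], 1): A raises KeyError, B returns [0]; on solution(['a'], ['a'], 1): A raises ValueError, B raises ValueError
import Mathlib
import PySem

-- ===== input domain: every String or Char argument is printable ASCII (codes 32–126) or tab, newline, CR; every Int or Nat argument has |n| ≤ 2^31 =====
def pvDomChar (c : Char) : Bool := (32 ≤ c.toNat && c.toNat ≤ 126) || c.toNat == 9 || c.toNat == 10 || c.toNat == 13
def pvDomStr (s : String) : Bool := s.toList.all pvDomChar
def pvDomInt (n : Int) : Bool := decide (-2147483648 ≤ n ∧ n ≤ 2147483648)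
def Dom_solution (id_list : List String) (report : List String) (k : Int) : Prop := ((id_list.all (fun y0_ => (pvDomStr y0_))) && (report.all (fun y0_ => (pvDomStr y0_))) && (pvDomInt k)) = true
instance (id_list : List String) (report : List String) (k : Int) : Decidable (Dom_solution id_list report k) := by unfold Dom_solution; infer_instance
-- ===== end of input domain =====

-- B replaces A's reportee-keyed graph of reporter-sets, index map and in-place answer increments by
-- three pure comprehensions over the deduped pair set (flagged ids by a per-id scan, then a direct
-- per-position count): no dicts, no mutable state — simpler, at quadratic instead of linear cost.


-- ===== PORT A =====
def solution (id_list : List String) (report : List String) (k : Int) : List Int :=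
  -- answer, id_number = [], {}; for i, id in enumerate(id_list): id_number[id] = i; answer.append(0)
  let st := (PySem.List.enumerate id_list 0).foldl
    (fun (st : List Int × PySem.Dict String Int) p => (st.1 ++ [(0 : Int)], st.2.insert p.2 p.1))
    ([], PySem.Dict.empty)
  let answer := st.1
  let id_number := st.2
  -- report_graph = defaultdict(set); for rp in report: userID, reportID = rp.split(); report_graph[reportID].add(userID)
  -- (a report that does not split into exactly two words raises ValueError in Python: outside Pre_, skipped here)
  let report_graph := report.foldl
    (fun (g : PySem.Dict String (PySem.Set String)) rp =>
      match PySem.Str.split₀ rp with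
      | [userID, reportID] => g.modify reportID [] (fun s => PySem.Set.add s userID)
      | _ => g)
    PySem.Dict.empty
  -- for id in id_list: if len(report_graph[id]) >= k: for r_id in report_graph[id]: answer[id_number[r_id]] += 1
  -- (defaultdict lookup report_graph[id] reads as getD ∅: the empty entry it would insert is never observed;
  --  id_number[r_id] raises KeyError for an unlisted reporter, which is outside Pre_, so getD 0 here; the stored
  --  index is a nonnegative list position, so .toNat is exact; the set loop only increments, so order cannot matter)
  id_list.foldl
    (fun answer id =>
      if k ≤ ((report_graph.getD id []).length : Int) then
        (report_graph.getD id []).foldl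
          (fun answer r_id => answer.modify (id_number.getD r_id 0).toNat (· + 1)) answer
      else answer)
    answer

-- ===== PORT B =====
-- tuple(rp.split()) as a pair: exact whenever the report splits into exactly two words (all reports
-- do inside Pre_; on other arities Python B raises ValueError on unpacking, excluded by Pre_)
def pvToPair (rp : String) : String × String :=
  ((PySem.Str.split₀ rp).headD "", (PySem.Str.split₀ rp).getD 1 "")

def solution_alt (id_list : List String) (report : List String) (k : Int) : List Int :=
  -- pairs = {tuple(rp.split()) for rp in report}
  let pairs : PySem.Set (String × String) := PySem.Set.ofList (report.map pvToPair)
  -- flagged = {r for r in id_list if sum(r2 == r for _, r2 in pairs) >= k}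
  -- (the sums over the set and the membership test below are order-insensitive, so set order is safe)
  let flagged : PySem.Set String :=
    PySem.Set.ofList (id_list.filter (fun r =>
      decide (k ≤ (pairs.countP (fun p => p.2 == r) : Int))))
  -- return [sum(1 for u, r in pairs if u == me and r in flagged) for me in id_list]
  id_list.map (fun me =>
    (pairs.countP (fun p => p.1 == me && PySem.Set.contains flagged p.2) : Int))

-- ===== PRECONDITION & SPEC =====
-- pvGrp report r = the distinct reporters of r (what A's report_graph[r] holds)
def pvGrp (report : List String) (r : String) : List String :=
  PySem.Set.ofList (((report.map pvToPair).filter (fun p => p.2 == r)).map (fun p => p.1))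

-- Pre_ excludes duplicate ids in id_list (A's last-wins index map and double processing of the duplicate are
-- accidental dict-overwrite artefacts), reports that do not split into exactly two words (A raises ValueError),
-- and reports whose reporter is unlisted while its reportee is a listed user with at least k distinct reporters
-- (there A raises KeyError on the answer-index lookup); everywhere else A returns.
def Pre_solution (id_list : List String) (report : List String) (k : Int) : Prop :=
  id_list.Nodup ∧ (∀ rp ∈ report, (PySem.Str.split₀ rp).length = 2) ∧
  ∀ rp ∈ report, (pvToPair rp).2 ∈ id_list → k ≤ ((pvGrp report (pvToPair rp).2).length : Int) →
    (pvToPair rp).1 ∈ id_list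
instance (id_list : List String) (report : List String) (k : Int) : Decidable (Pre_solution id_list report k) := by
  unfold Pre_solution; infer_instance

def pvWitness_solution : List String × List String × Int :=
  (["muzi", "frodo", "apeach"], ["muzi frodo", "apeach frodo", "muzi frodo"], 2)

def Spec_solution (id_list : List String) (report : List String) (k : Int) (out : List Int) : Prop :=
  out = solution_alt id_list report k
instance (id_list : List String) (report : List String) (k : Int) (out : List Int) : Decidable (Spec_solution id_list report k out) := by
  unfold Spec_solution; infer_instance

-- ===== CLAIM (what is proved, stated in full; the proofs are below) =====
def Claim_equal_solution : Prop := ∀ (id_list : List String) (report : List String) (k : Int), Dom_solution id_list report k → Pre_solution id_list report k → Spec_solution id_list report k (solution id_list report k)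


-- ===== LEMMAS AND PROOFS =====

-- Abstractions shared by both normal forms
def pvPairs (report : List String) : List (String × String) :=
  PySem.Set.ofList (report.map pvToPair)

def pvCnt (report : List String) (r : String) : Nat :=
  (pvPairs report).countP (fun p => p.2 == r)

def pvIdxDict (id_list : List String) : PySem.Dict String Int :=
  (PySem.List.enumerate id_list 0).foldl (fun d p => d.insert p.2 p.1) PySem.Dict.empty

lemma pv_split_eq {rp : String} (h : (PySem.Str.split₀ rp).length = 2) :
    PySem.Str.split₀ rp = [(pvToPair rp).1, (pvToPair rp).2] := by
  obtain ⟨a, b, hab⟩ := List.length_eq_two.mp h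
  simp [pvToPair, hab]

lemma pv_mem_map_fst_filter (l : List (String × String)) (r u : String) :
    u ∈ (l.filter (fun p => p.2 == r)).map (fun p => p.1) ↔ (u, r) ∈ l := by
  simp only [List.mem_map, List.mem_filter, beq_iff_eq]
  constructor
  · rintro ⟨p, ⟨hp, h2⟩, h1⟩
    have : p = (u, r) := by cases p; simp_all
    exact this ▸ hp
  · intro h
    exact ⟨(u, r), ⟨h, rfl⟩, rfl⟩

lemma pv_mem_grp {report : List String} {r u : String} :
    u ∈ pvGrp report r ↔ (u, r) ∈ pvPairs report := by
  rw [pvGrp, PySem.Set.mem_ofList, pv_mem_map_fst_filter, pvPairs, PySem.Set.mem_ofList]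

lemma pv_grp_nodup (report : List String) (r : String) : (pvGrp report r).Nodup :=
  PySem.Set.nodup_ofList _

lemma pv_pairs_nodup (report : List String) : (pvPairs report).Nodup :=
  PySem.Set.nodup_ofList _

lemma pv_grp_length (report : List String) (r : String) :
    (pvGrp report r).length = pvCnt report r := by
  have hfil : ((pvPairs report).filter (fun p => p.2 == r)).Nodup :=
    (pv_pairs_nodup report).filter _
  have hmap : (((pvPairs report).filter (fun p => p.2 == r)).map (fun p => p.1)).Nodup := by
    refine hfil.map_on ?_
    intro x hx y hy hxy
    have hx2 : x.2 = r := by simpa using (List.mem_filter.mp hx).2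
    have hy2 : y.2 = r := by simpa using (List.mem_filter.mp hy).2
    cases x; cases y; simp_all
  have hmem : ∀ u, u ∈ ((pvPairs report).filter (fun p => p.2 == r)).map (fun p => p.1)
      ↔ u ∈ pvGrp report r := by
    intro u
    rw [pv_mem_map_fst_filter, pv_mem_grp]
  have hperm : (((pvPairs report).filter (fun p => p.2 == r)).map (fun p => p.1)).Perm
      (pvGrp report r) :=
    (List.perm_ext_iff_of_nodup hmap (pv_grp_nodup report r)).mpr hmem
  have := hperm.length_eq
  rw [List.length_map] at this
  rw [← this, pvCnt, List.countP_eq_length_filter]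

-- A's first loop: the graph fold equals the same fold over the parsed pairs
lemma pv_graph_getD (l : List (String × String)) (g : PySem.Dict String (PySem.Set String)) (r : String) :
    (l.foldl (fun g p => g.modify p.2 [] (fun s => PySem.Set.add s p.1)) g).getD r []
      = PySem.Set.update (g.getD r []) ((l.filter (fun p => p.2 == r)).map (fun p => p.1)) := by
  induction l generalizing g with
  | nil => simp [PySem.Set.update]
  | cons p t ih =>
    rw [List.foldl_cons, ih]
    by_cases h : p.2 = r
    · subst h
      simp only [List.filter_cons, beq_self_eq_true, if_pos, List.map_cons]
      rw [PySem.Dict.getD_modify]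
      simp [PySem.Set.update]
    · have hb : (p.2 == r) = false := by simp [h]
      simp only [List.filter_cons, hb, Bool.false_eq_true, ite_false]
      rw [PySem.Dict.getD_modify]
      have : ¬ (r = p.2) := fun hh => h hh.symm
      simp [this]

-- the increment loop, pointwise
lemma pv_inc_get (g : String → Nat) (us : List String) (a : List Int) (i : Nat) :
    (us.foldl (fun a u => a.modify (g u) (· + 1)) a)[i]?
      = a[i]?.map (· + (us.countP (fun u => g u == i) : Int)) := by
  induction us generalizing a with
  | nil => simp
  | cons u t ih =>
    rw [List.foldl_cons, ih, List.getElem?_modify]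
    cases ha : a[i]? with
    | none => simp
    | some x =>
      simp only [Option.map]
      rw [List.countP_cons]
      by_cases h : g u = i
      · simp [h]; ring
      · have : (g u == i) = false := by simp [h]
        simp [this, h]

lemma pv_foldl_flatMap {α β σ : Type} (xs : List α) (g : α → List β) (f : σ → β → σ) (init : σ) :
    xs.foldl (fun s x => (g x).foldl f s) init = (xs.flatMap g).foldl f init := by
  induction xs generalizing init with
  | nil => rfl
  | cons x t ih => rw [List.foldl_cons, List.flatMap_cons, List.foldl_append, ih]

lemma pv_sum_map_filter (l : List String) (c : String → Bool) (f : String → Nat) :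
    ((l.filter c).map f).sum = (l.map (fun x => if c x then f x else 0)).sum := by
  induction l with
  | nil => rfl
  | cons x t ih =>
    by_cases h : c x
    · simp [h, ih]
    · simp [h, ih]

lemma pv_sum_indicator (ids : List String) (x : String) (hnd : ids.Nodup) (hx : x ∈ ids) :
    (ids.map (fun id => if x == id then (1 : Nat) else 0)).sum = 1 := by
  induction ids with
  | nil => cases hx
  | cons y t ih =>
    rw [List.map_cons, List.sum_cons]
    rcases List.mem_cons.mp hx with h | h
    · subst h
      have hxt : x ∉ t := (List.nodup_cons.mp hnd).1
      have hz : (t.map (fun id => if x == id then (1 : Nat) else 0)).sum = 0 := by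
        rw [List.sum_eq_zero_iff]
        intro a ha
        obtain ⟨id, hid, rfl⟩ := List.mem_map.mp ha
        have hne : (x == id) = false := by
          rw [beq_eq_false_iff_ne]
          exact fun hh => hxt (hh ▸ hid)
        simp [hne]
      rw [hz]
      simp
    · have hxy : (x == y) = false := by
        rw [beq_eq_false_iff_ne]
        exact fun hh => (List.nodup_cons.mp hnd).1 (hh ▸ h)
      rw [ih (List.nodup_cons.mp hnd).2 h]
      simp [hxy]

lemma pv_countP_partition (P : List (String × String)) (ids : List String) (hnd : ids.Nodup)
    (pred : (String × String) → Bool) (hmem : ∀ p ∈ P, pred p = true → p.2 ∈ ids) :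
    P.countP pred = (ids.map (fun id => P.countP (fun p => pred p && p.2 == id))).sum := by
  induction P with
  | nil => simp
  | cons p t ih =>
    have ht : ∀ q ∈ t, pred q = true → q.2 ∈ ids := fun q hq => hmem q (List.mem_cons_of_mem _ hq)
    rw [List.countP_cons, ih ht]
    have hsplit : (ids.map (fun id => (p :: t).countP (fun q => pred q && q.2 == id))).sum
        = (ids.map (fun id => t.countP (fun q => pred q && q.2 == id))).sum
          + (ids.map (fun id => if pred p && p.2 == id then (1 : Nat) else 0)).sum := by
      rw [← List.sum_map_add]
      apply congrArg
      apply List.map_congr_left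
      intro id _
      rw [List.countP_cons]
    rw [hsplit]
    congr 1
    by_cases hp : pred p = true
    · have hfun : (fun id => if (pred p && p.2 == id) = true then (1 : Nat) else 0)
          = (fun id => if (p.2 == id) = true then (1 : Nat) else 0) := by
        funext id
        rw [hp, Bool.true_and]
      rw [hfun, pv_sum_indicator ids p.2 hnd (hmem p List.mem_cons_self hp), hp]
      simp
    · have hp' : pred p = false := by simpa using hp
      simp [hp']

lemma pv_idx_getD (id_list : List String) (hnd : id_list.Nodup) (j : Nat) (hj : j < id_list.length) :
    (pvIdxDict id_list).getD (id_list[j]) 0 = (j : Int) := by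
  have hfresh : ∀ a ∈ PySem.List.enumerate id_list 0,
      (PySem.Dict.empty : PySem.Dict String Int).contains (a.2) = false := by
    intro a _; simp
  have hnodup : ((PySem.List.enumerate id_list 0).map (fun p => p.2)).Nodup := by
    rw [PySem.List.map_snd_enumerate]; exact hnd
  have hitems := PySem.Dict.items_foldl_insert_fresh (PySem.List.enumerate id_list 0)
      (fun p => p.2) (fun p => p.1) PySem.Dict.empty hfresh hnodup
  have hempty : (PySem.Dict.empty : PySem.Dict String Int).items = [] := rfl
  have hmemi : ((id_list[j] : String), (j : Int)) ∈ (pvIdxDict id_list).items := by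
    rw [pvIdxDict, hitems, hempty, List.nil_append, List.mem_map]
    refine ⟨((j : Int), id_list[j]), ?_, rfl⟩
    have hje : j < (PySem.List.enumerate id_list 0).length := by
      rw [PySem.List.length_enumerate]; exact hj
    have := PySem.List.getElem_enumerate (xs := id_list) (s := 0) (k := j) (h := hje)
    rw [show ((0 : Int) + (j : Int), id_list[j]) = ((j : Int), id_list[j]) by simp] at this
    rw [← this]
    exact List.getElem_mem _
  have hkeys : (pvIdxDict id_list).keys.Nodup := by
    rw [PySem.Dict.keys, pvIdxDict, hitems, hempty, List.nil_append, List.map_map]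
    have hc : ((fun x : String × Int => x.1) ∘ fun a : Int × String => (a.2, a.1))
        = fun a : Int × String => a.2 := rfl
    rw [hc]
    exact hnodup
  exact PySem.Dict.getD_of_mem_items _ hmemi hkeys 0

lemma pv_idx_eq_iff (id_list : List String) (hnd : id_list.Nodup) {u : String} (hu : u ∈ id_list)
    {i : Nat} (hi : i < id_list.length) :
    (((pvIdxDict id_list).getD u 0).toNat = i) ↔ u = id_list[i] := by
  obtain ⟨j, hj, rfl⟩ := List.mem_iff_getElem.mp hu
  rw [pv_idx_getD id_list hnd j hj]
  simp only [Int.toNat_natCast]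
  constructor
  · rintro rfl; rfl
  · intro h
    exact (List.Nodup.getElem_inj_iff hnd).mp h

-- ===== normal form of B =====
lemma pv_alt_eq (id_list report : List String) (k : Int) :
    solution_alt id_list report k
      = id_list.map (fun uid =>
          ((pvPairs report).countP
            (fun p => p.1 == uid
              && (decide (p.2 ∈ id_list) && decide (k ≤ (pvCnt report p.2 : Int)))) : Int)) := by
  simp only [solution_alt]
  apply List.map_congr_left
  intro uid _
  congr 1
  apply List.countP_congr
  intro p _
  have hmem : PySem.Set.contains
      (PySem.Set.ofList (id_list.filter (fun r =>
        decide (k ≤ ((PySem.Set.ofList (report.map pvToPair)).countP (fun q => q.2 == r) : Int))))) p.2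
      = (decide (p.2 ∈ id_list) && decide (k ≤ (pvCnt report p.2 : Int))) := by
    by_cases hc : p.2 ∈ id_list ∧ k ≤ (pvCnt report p.2 : Int)
    · have : p.2 ∈ id_list.filter (fun r =>
          decide (k ≤ ((PySem.Set.ofList (report.map pvToPair)).countP (fun q => q.2 == r) : Int))) := by
        rw [List.mem_filter]
        exact ⟨hc.1, by simpa [pvCnt, pvPairs] using hc.2⟩
      rw [(PySem.Set.contains_iff _ _).mpr ((PySem.Set.mem_ofList _ _).mpr this)]
      simp [hc.1, hc.2]
    · have hnot : p.2 ∉ id_list.filter (fun r =>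
          decide (k ≤ ((PySem.Set.ofList (report.map pvToPair)).countP (fun q => q.2 == r) : Int))) := by
        rw [List.mem_filter]
        intro ⟨h1, h2⟩
        exact hc ⟨h1, by simpa [pvCnt, pvPairs] using h2⟩
      have hfalse : PySem.Set.contains
          (PySem.Set.ofList (id_list.filter (fun r =>
            decide (k ≤ ((PySem.Set.ofList (report.map pvToPair)).countP (fun q => q.2 == r) : Int))))) p.2
          = false := by
        by_contra hcc
        exact hnot ((PySem.Set.mem_ofList _ _).mp
          ((PySem.Set.contains_iff _ _).mp (by revert hcc; cases PySem.Set.contains (PySem.Set.ofList (id_list.filter (fun r => decide (k ≤ ((PySem.Set.ofList (report.map pvToPair)).countP (fun q => q.2 == r) : Int))))) p.2 <;> simp)))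
      rw [hfalse]
      rcases Decidable.not_and_iff_not_or_not.mp hc with h | h <;> simp [h]
  rw [hmem]

-- ===== normal form of A =====
lemma pv_a_eq (id_list report : List String) (k : Int)
    (hwf : ∀ rp ∈ report, (PySem.Str.split₀ rp).length = 2) :
    solution id_list report k
      = ((id_list.filter (fun id => decide (k ≤ ((pvGrp report id).length : Int)))).flatMap
          (fun id => pvGrp report id)).foldl
          (fun a u => a.modify ((pvIdxDict id_list).getD u 0).toNat (· + 1))
          (List.replicate id_list.length (0 : Int)) := by
  simp only [solution]
  rw [PySem.List.foldl_prod_mk (f := fun (a : List Int) (_ : Int × String) => a ++ [(0 : Int)])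
      (g := fun (d : PySem.Dict String Int) (p : Int × String) => d.insert p.2 p.1)]
  have hans : (PySem.List.enumerate id_list 0).foldl (fun a _ => a ++ [(0 : Int)]) []
      = List.replicate id_list.length (0 : Int) := by
    rw [PySem.List.foldl_append_singleton_eq_map (f := fun _ => (0 : Int))]
    simp [List.map_const', PySem.List.length_enumerate]
  have hgraph : report.foldl
      (fun (g : PySem.Dict String (PySem.Set String)) rp =>
        match PySem.Str.split₀ rp with
        | [userID, reportID] => g.modify reportID [] (fun s => PySem.Set.add s userID)
        | _ => g) PySem.Dict.empty
      = (report.map pvToPair).foldl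
          (fun g p => g.modify p.2 [] (fun s => PySem.Set.add s p.1)) PySem.Dict.empty := by
    rw [List.foldl_map]
    apply PySem.List.foldl_congr_mem
    intro acc rp hrp
    rw [pv_split_eq (hwf rp hrp)]
  have hgetD : ∀ r, ((report.map pvToPair).foldl
      (fun g p => g.modify p.2 [] (fun s => PySem.Set.add s p.1)) PySem.Dict.empty).getD r []
      = pvGrp report r := by
    intro r
    rw [pv_graph_getD, PySem.Dict.getD_empty, pvGrp, PySem.Set.ofList_eq_foldl]
    rfl
  have hidx : (PySem.List.enumerate id_list 0).foldl
      (fun (d : PySem.Dict String Int) (p : Int × String) => d.insert p.2 p.1) PySem.Dict.empty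
      = pvIdxDict id_list := rfl
  rw [hans, hgraph, hidx]
  simp only [hgetD]
  rw [PySem.List.foldl_ite_eq_foldl_filter
    (p := fun id => k ≤ ((pvGrp report id).length : Int))
    (f := fun (a : List Int) id => (pvGrp report id).foldl
      (fun a r_id => a.modify (((pvIdxDict id_list).getD r_id 0).toNat) (· + 1)) a)]
  rw [pv_foldl_flatMap]

-- the elementwise core
lemma pv_core (id_list report : List String) (k : Int)
    (hnd : id_list.Nodup)
    (hsafe : ∀ p ∈ pvPairs report, p.2 ∈ id_list →
      k ≤ ((pvGrp report p.2).length : Int) → p.1 ∈ id_list)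
    (i : Nat) (hi : i < id_list.length) :
    ((id_list.filter (fun id => decide (k ≤ ((pvGrp report id).length : Int)))).flatMap
        (fun id => pvGrp report id)).countP
        (fun u => ((pvIdxDict id_list).getD u 0).toNat == i)
      = (pvPairs report).countP
          (fun p => p.1 == id_list[i]
            && (decide (p.2 ∈ id_list) && decide (k ≤ (pvCnt report p.2 : Int)))) := by
  rw [List.countP_flatMap]
  rw [pv_sum_map_filter]
  rw [pv_countP_partition (pvPairs report) id_list hnd _
    (fun p _ hp => of_decide_eq_true (Bool.and_elim_left (Bool.and_elim_right hp)))]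
  apply congrArg
  apply List.map_congr_left
  intro id hidl
  by_cases hk : k ≤ (pvCnt report id : Int)
  · have hk' : k ≤ ((pvGrp report id).length : Int) := by rw [pv_grp_length]; exact hk
    rw [if_pos (by simpa using hk')]
    have hcnt1 : (List.countP (fun u => ((pvIdxDict id_list).getD u 0).toNat == i) ∘
        fun id => pvGrp report id) id
        = (pvGrp report id).countP (fun u => u == id_list[i]) := by
      simp only [Function.comp]
      apply List.countP_congr
      intro u hu
      have hu1 : u ∈ id_list := hsafe (u, id) (pv_mem_grp.mp hu) hidl hk'
      have hiff := pv_idx_eq_iff id_list hnd hu1 hi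
      by_cases h : u = id_list[i]
      · have h2 := hiff.mpr h
        subst h
        simp [h2]
      · have h2 : ((pvIdxDict id_list).getD u 0).toNat ≠ i := fun hh => h (hiff.mp hh)
        simp [h, h2]
    rw [hcnt1]
    have hrhs : (pvPairs report).countP
        (fun p => (p.1 == id_list[i]
          && (decide (p.2 ∈ id_list) && decide (k ≤ (pvCnt report p.2 : Int)))) && p.2 == id)
        = (pvPairs report).countP (fun p => p == (id_list[i], id)) := by
      apply List.countP_congr
      intro p _
      by_cases h2 : p.2 = id
      · subst h2
        by_cases h1 : p.1 = id_list[i]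
        · have hp : p = (id_list[i], p.2) := by cases p; simp_all
          simp [h1, hk, hidl, ← hp]
        · have hp : p ≠ (id_list[i], p.2) := fun hh => h1 (by rw [hh])
          simp [h1, hp]
      · have hp : p ≠ (id_list[i], id) := fun hh => h2 (by rw [hh])
        simp [h2, hp]
    rw [hrhs]
    have hL : (pvGrp report id).countP (fun u => u == id_list[i])
        = List.count (id_list[i]) (pvGrp report id) := rfl
    have hR : (pvPairs report).countP (fun p => p == (id_list[i], id))
        = List.count ((id_list[i]), id) (pvPairs report) := rfl
    rw [hL, hR, List.Nodup.count (pv_grp_nodup report id), List.Nodup.count (pv_pairs_nodup report)]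
    simp [pv_mem_grp]
  · have hk' : ¬ k ≤ ((pvGrp report id).length : Int) := by rw [pv_grp_length]; exact hk
    rw [if_neg (by simpa using hk')]
    have : (pvPairs report).countP
        (fun p => (p.1 == id_list[i]
          && (decide (p.2 ∈ id_list) && decide (k ≤ (pvCnt report p.2 : Int)))) && p.2 == id) = 0 := by
      rw [List.countP_eq_zero]
      intro p hp
      by_cases h2 : p.2 = id
      · simp [h2, hk]
      · simp [h2]
    rw [this]

-- ===== VERDICT (by name: the statement is the Claim_ definition above) =====
theorem solution_spec : Claim_equal_solution := by
  intro id_list report k _ hpre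
  obtain ⟨hnd, hwf, hsafe0⟩ := hpre
  have hsafe : ∀ p ∈ pvPairs report, p.2 ∈ id_list →
      k ≤ ((pvGrp report p.2).length : Int) → p.1 ∈ id_list := by
    intro p hp
    rw [pvPairs, PySem.Set.mem_ofList] at hp
    obtain ⟨rp, hrp, rfl⟩ := List.mem_map.mp hp
    exact hsafe0 rp hrp
  unfold Spec_solution
  rw [pv_a_eq id_list report k hwf, pv_alt_eq id_list report k]
  apply List.ext_getElem?
  intro i
  by_cases hi : i < id_list.length
  · rw [pv_inc_get]
    rw [List.getElem?_eq_getElem (by simpa using hi), List.getElem?_eq_getElem (by simpa using hi)]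
    simp only [List.getElem_replicate, List.getElem_map, Option.map_some]
    congr 1
    rw [pv_core id_list report k hnd hsafe i hi]
    ring
  · rw [pv_inc_get]
    rw [List.getElem?_eq_none (by simpa using Nat.le_of_not_lt hi),
        List.getElem?_eq_none (by simpa using Nat.le_of_not_lt hi)]
    rfl
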